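-- pv_equiv track=rewrite | github.com/baobaotang0/new_outline | class/2dcars/import.py | get_min_max_3d
-- ===== SOURCE A (Python) =====
-- def get_min_max_3d(car):
--     p_min = car[0].copy()
--     p_max = car[0].copy()
--     for p in car:
--         for i in range(3):
--             if p[i] < p_min[i]:
--                 p_min[i] = p[i]
--             if p[i] > p_max[i]:
--                 p_max[i] = p[i]
--     return p_min, p_max
-- ===== SOURCE B (Python) =====
-- def get_min_max_3d(car):
--     p_min = car[0].copy()
--     p_max = car[0].copy()
--     for i in range(3):
--         p_min[i] = min(p[i] for p in car)
--         p_max[i] = max(p[i] for p in car)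
--     return p_min, p_max
-- ===== Notes on version B (the rewrite author's own statement) =====
-- stated objective: idiomatic
-- what changed: Transposes the traversal: instead of a row-major sweep over points with conditional comparison-updates per axis, B loops over the three axes and reduces each coordinate column with the built-in min/max.
import Mathlib
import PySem

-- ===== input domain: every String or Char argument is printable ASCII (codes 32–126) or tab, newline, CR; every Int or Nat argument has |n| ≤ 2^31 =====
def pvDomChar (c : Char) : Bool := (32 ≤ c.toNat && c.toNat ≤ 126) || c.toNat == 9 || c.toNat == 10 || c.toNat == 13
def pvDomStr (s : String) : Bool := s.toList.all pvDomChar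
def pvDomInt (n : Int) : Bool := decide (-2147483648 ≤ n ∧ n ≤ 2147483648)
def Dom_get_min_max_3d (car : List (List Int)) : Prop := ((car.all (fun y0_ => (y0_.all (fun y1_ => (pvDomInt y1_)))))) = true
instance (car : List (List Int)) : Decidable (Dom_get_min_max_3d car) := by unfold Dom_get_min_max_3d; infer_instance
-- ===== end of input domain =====

-- B loops over the three axes and reduces each coordinate column with built-in min/max,
-- instead of A's row-major sweep over points with conditional updates; same cost, more idiomatic.

-- ===== PORT A =====
-- p[i] for an index that Pre_ guarantees in range: pyGet? then a default never used inside Pre_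
def pvAt (p : List Int) (i : Nat) : Int := (PySem.List.pyGet? p (Int.ofNat i)).getD 0

def get_min_max_3d (car : List (List Int)) : List Int × List Int :=
  let p0 := car.headD []
  car.foldl (fun st p =>
    (List.range 3).foldl (fun st i =>
      let v := pvAt p i
      let pmin := if v < pvAt st.1 i then st.1.set i v else st.1
      let pmax := if v > pvAt st.2 i then st.2.set i v else st.2
      (pmin, pmax)) st) (p0, p0)

-- ===== PORT B =====
def get_min_max_3d_alt (car : List (List Int)) : List Int × List Int :=
  let p0 := car.headD []
  (List.range 3).foldl (fun st i =>
    let col := car.map (fun p => pvAt p i)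
    (st.1.set i ((PySem.List.min? col (fun x => x)).getD 0),
     st.2.set i ((PySem.List.max? col (fun x => x)).getD 0))) (p0, p0)

-- ===== PRECONDITION & SPEC =====
-- Pre_ excludes exactly the inputs where the Python A raises IndexError:
-- the empty list (car[0]) and any point with fewer than 3 coordinates (p[i]).
def Pre_get_min_max_3d (car : List (List Int)) : Prop :=
  car ≠ [] ∧ ∀ p ∈ car, 3 ≤ p.length
instance (car : List (List Int)) : Decidable (Pre_get_min_max_3d car) := by
  unfold Pre_get_min_max_3d; infer_instance
def pvWitness_get_min_max_3d : List (List Int) := [[1, 5, 3], [2, 0, 4]]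
def Spec_get_min_max_3d (car : List (List Int)) (out : List Int × List Int) : Prop := out = get_min_max_3d_alt car
instance (car : List (List Int)) (out : List Int × List Int) : Decidable (Spec_get_min_max_3d car out) := by unfold Spec_get_min_max_3d; infer_instance

-- ===== CLAIM (what is proved, stated in full; the proofs are below) =====
def Claim_equal_get_min_max_3d : Prop := ∀ (car : List (List Int)), Dom_get_min_max_3d car → Pre_get_min_max_3d car → Spec_get_min_max_3d car (get_min_max_3d car)

-- ===== LEMMAS AND PROOFS =====

-- one conditional update of A at axis i (min side / max side)
def updMin (p : List Int) (i : Nat) (s : List Int) : List Int :=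
  if pvAt p i < pvAt s i then s.set i (pvAt p i) else s
def updMax (p : List Int) (i : Nat) (s : List Int) : List Int :=
  if pvAt p i > pvAt s i then s.set i (pvAt p i) else s
-- A's inner range(3) pass on one point, per side
def passMin (s p : List Int) : List Int := updMin p 2 (updMin p 1 (updMin p 0 s))
def passMax (s p : List Int) : List Int := updMax p 2 (updMax p 1 (updMax p 0 s))

theorem pvAt_eq (p : List Int) (i : Nat) (h : i < p.length) : pvAt p i = p[i] := by
  simp [pvAt, PySem.List.pyGet?_natCast, List.getElem?_eq_getElem h]

theorem foldl_prod {α β γ : Type} (f : α → γ → α) (g : β → γ → β) (l : List γ) (a : α) (b : β) :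
    l.foldl (fun st p => (f st.1 p, g st.2 p)) (a, b) = (l.foldl f a, l.foldl g b) := by
  induction l generalizing a b with
  | nil => rfl
  | cons x t ih => simpa using ih (f a x) (g b x)

theorem portA_eq (car : List (List Int)) :
    get_min_max_3d car = (car.foldl passMin (car.headD []), car.foldl passMax (car.headD [])) := by
  unfold get_min_max_3d
  have h : (fun (st : List Int × List Int) (p : List Int) =>
      (List.range 3).foldl (fun st i =>
        let v := pvAt p i
        let pmin := if v < pvAt st.1 i then st.1.set i v else st.1
        let pmax := if v > pvAt st.2 i then st.2.set i v else st.2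
        (pmin, pmax)) st)
      = fun st p => (passMin st.1 p, passMax st.2 p) := by
    funext st p; rfl
  rw [h, foldl_prod]

theorem updMin_length (p : List Int) (i : Nat) (s : List Int) :
    (updMin p i s).length = s.length := by
  unfold updMin; split <;> simp
theorem updMax_length (p : List Int) (i : Nat) (s : List Int) :
    (updMax p i s).length = s.length := by
  unfold updMax; split <;> simp
theorem passMin_length (s p : List Int) : (passMin s p).length = s.length := by
  simp [passMin, updMin_length]
theorem passMax_length (s p : List Int) : (passMax s p).length = s.length := by
  simp [passMax, updMax_length]

theorem updMin_getElem (p : List Int) (i : Nat) (s : List Int) (hip : i < p.length)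
    (j : Nat) (hj : j < s.length) :
    (updMin p i s)[j]'(by rw [updMin_length]; exact hj)
      = if j = i then min s[j] p[i] else s[j] := by
  unfold updMin
  by_cases hi : i < s.length
  · split <;> rename_i hlt <;> rw [pvAt_eq p i hip, pvAt_eq s i hi] at hlt
    · rw [List.getElem_set]
      by_cases hji : i = j
      · subst hji
        simp [pvAt_eq p i hip, min_eq_right hlt.le]
      · simp [hji, Ne.symm hji]
    · by_cases hji : j = i
      · subst hji
        simp [min_eq_left (not_lt.mp hlt)]
      · simp [hji]
  · have hji : ¬ j = i := by omega
    split
    · rw [List.getElem_set]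
      simp [Ne.symm hji]
    · simp

theorem updMax_getElem (p : List Int) (i : Nat) (s : List Int) (hip : i < p.length)
    (j : Nat) (hj : j < s.length) :
    (updMax p i s)[j]'(by rw [updMax_length]; exact hj)
      = if j = i then max s[j] p[i] else s[j] := by
  unfold updMax
  by_cases hi : i < s.length
  · split <;> rename_i hlt <;> rw [pvAt_eq p i hip, pvAt_eq s i hi] at hlt
    · rw [List.getElem_set]
      by_cases hji : i = j
      · subst hji
        simp [pvAt_eq p i hip, max_eq_right hlt.le]
      · simp [hji, Ne.symm hji]
    · by_cases hji : j = i
      · subst hji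
        simp [max_eq_left (not_lt.mp hlt)]
      · simp [hji]
  · have hji : ¬ j = i := by omega
    split
    · rw [List.getElem_set]
      simp [Ne.symm hji]
    · simp

theorem passMin_getElem (s p : List Int) (hp : 3 ≤ p.length)
    (j : Nat) (hj : j < s.length) :
    (passMin s p)[j]'(by rw [passMin_length]; exact hj)
      = if j < 3 then min s[j] (pvAt p j) else s[j] := by
  have hp0 : (0 : Nat) < p.length := by omega
  have hp1 : (1 : Nat) < p.length := by omega
  have hp2 : (2 : Nat) < p.length := by omega
  have hj1 : j < (updMin p 0 s).length := by rw [updMin_length]; exact hj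
  have hj2 : j < (updMin p 1 (updMin p 0 s)).length := by
    rw [updMin_length, updMin_length]; exact hj
  unfold passMin
  rw [updMin_getElem p 2 _ hp2 j hj2, updMin_getElem p 1 _ hp1 j hj1,
      updMin_getElem p 0 _ hp0 j hj]
  rcases Nat.lt_or_ge j 3 with h3 | h3
  · interval_cases j <;>
      simp [pvAt_eq p 0 hp0, pvAt_eq p 1 hp1, pvAt_eq p 2 hp2]
  · have h0 : ¬ j = 0 := by omega
    have h1 : ¬ j = 1 := by omega
    have h2 : ¬ j = 2 := by omega
    have h3' : ¬ j < 3 := by omega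
    simp [h0, h1, h2, h3']

theorem passMax_getElem (s p : List Int) (hp : 3 ≤ p.length)
    (j : Nat) (hj : j < s.length) :
    (passMax s p)[j]'(by rw [passMax_length]; exact hj)
      = if j < 3 then max s[j] (pvAt p j) else s[j] := by
  have hp0 : (0 : Nat) < p.length := by omega
  have hp1 : (1 : Nat) < p.length := by omega
  have hp2 : (2 : Nat) < p.length := by omega
  have hj1 : j < (updMax p 0 s).length := by rw [updMax_length]; exact hj
  have hj2 : j < (updMax p 1 (updMax p 0 s)).length := by
    rw [updMax_length, updMax_length]; exact hj
  unfold passMax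
  rw [updMax_getElem p 2 _ hp2 j hj2, updMax_getElem p 1 _ hp1 j hj1,
      updMax_getElem p 0 _ hp0 j hj]
  rcases Nat.lt_or_ge j 3 with h3 | h3
  · interval_cases j <;>
      simp [pvAt_eq p 0 hp0, pvAt_eq p 1 hp1, pvAt_eq p 2 hp2]
  · have h0 : ¬ j = 0 := by omega
    have h1 : ¬ j = 1 := by omega
    have h2 : ¬ j = 2 := by omega
    have h3' : ¬ j < 3 := by omega
    simp [h0, h1, h2, h3']

theorem foldMin_length (l : List (List Int)) (s : List Int) :
    (l.foldl passMin s).length = s.length := by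
  induction l generalizing s with
  | nil => rfl
  | cons x t ih => simp [List.foldl, ih, passMin_length]
theorem foldMax_length (l : List (List Int)) (s : List Int) :
    (l.foldl passMax s).length = s.length := by
  induction l generalizing s with
  | nil => rfl
  | cons x t ih => simp [List.foldl, ih, passMax_length]

theorem foldMin_getElem (l : List (List Int)) (hl : ∀ p ∈ l, 3 ≤ p.length)
    (s : List Int) (j : Nat) (hj : j < s.length) :
    (l.foldl passMin s)[j]'(by rw [foldMin_length]; exact hj)
      = if j < 3 then (l.map (fun p => pvAt p j)).foldl min s[j] else s[j] := by
  induction l generalizing s with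
  | nil => simp
  | cons x t ih =>
    have hx : 3 ≤ x.length := hl x (by simp)
    have ht : ∀ p ∈ t, 3 ≤ p.length := fun p hp => hl p (by simp [hp])
    have hj' : j < (passMin s x).length := by rw [passMin_length]; exact hj
    simp only [List.foldl_cons]
    rw [ih ht (passMin s x) hj', passMin_getElem s x hx j hj]
    rcases Nat.lt_or_ge j 3 with h3 | h3
    · simp [h3]
    · have h3' : ¬ j < 3 := by omega
      simp [h3']
theorem foldMax_getElem (l : List (List Int)) (hl : ∀ p ∈ l, 3 ≤ p.length)
    (s : List Int) (j : Nat) (hj : j < s.length) :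
    (l.foldl passMax s)[j]'(by rw [foldMax_length]; exact hj)
      = if j < 3 then (l.map (fun p => pvAt p j)).foldl max s[j] else s[j] := by
  induction l generalizing s with
  | nil => simp
  | cons x t ih =>
    have hx : 3 ≤ x.length := hl x (by simp)
    have ht : ∀ p ∈ t, 3 ≤ p.length := fun p hp => hl p (by simp [hp])
    have hj' : j < (passMax s x).length := by rw [passMax_length]; exact hj
    simp only [List.foldl_cons]
    rw [ih ht (passMax s x) hj', passMax_getElem s x hx j hj]
    rcases Nat.lt_or_ge j 3 with h3 | h3
    · simp [h3]
    · have h3' : ¬ j < 3 := by omega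
      simp [h3']

-- B's range(3) fold over a literal list, written out as the explicit set chain it computes
theorem portB_eq (car : List (List Int)) :
    get_min_max_3d_alt car =
      (((((car.headD []).set 0 ((PySem.List.min? (car.map (fun p => pvAt p 0)) (fun x => x)).getD 0)).set 1
          ((PySem.List.min? (car.map (fun p => pvAt p 1)) (fun x => x)).getD 0)).set 2
          ((PySem.List.min? (car.map (fun p => pvAt p 2)) (fun x => x)).getD 0)),
       ((((car.headD []).set 0 ((PySem.List.max? (car.map (fun p => pvAt p 0)) (fun x => x)).getD 0)).set 1
          ((PySem.List.max? (car.map (fun p => pvAt p 1)) (fun x => x)).getD 0)).set 2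
          ((PySem.List.max? (car.map (fun p => pvAt p 2)) (fun x => x)).getD 0))) := rfl

-- ===== VERDICT (by name: the statement is the Claim_ definition above) =====
theorem get_min_max_3d_spec : Claim_equal_get_min_max_3d := by
  intro car _ hpre
  obtain ⟨hne, hlen⟩ := hpre
  obtain ⟨q, rest, rfl⟩ : ∃ q rest, car = q :: rest := by
    cases car with
    | nil => exact absurd rfl hne
    | cons q rest => exact ⟨q, rest, rfl⟩
  have hq : 3 ≤ q.length := hlen q (by simp)
  show get_min_max_3d _ = get_min_max_3d_alt _
  rw [portA_eq, portB_eq]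
  simp only [List.headD_cons]
  have hBmin : ∀ i : Nat,
      (PySem.List.min? ((q :: rest).map (fun p => pvAt p i)) (fun x => x)).getD 0
        = (rest.map (fun p => pvAt p i)).foldl min (pvAt q i) := by
    intro i
    rw [List.map_cons, PySem.List.min?_id_cons]
    rfl
  have hBmax : ∀ i : Nat,
      (PySem.List.max? ((q :: rest).map (fun p => pvAt p i)) (fun x => x)).getD 0
        = (rest.map (fun p => pvAt p i)).foldl max (pvAt q i) := by
    intro i
    rw [List.map_cons, PySem.List.max?_id_cons]
    rfl
  rw [hBmin 0, hBmin 1, hBmin 2, hBmax 0, hBmax 1, hBmax 2]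
  have hAcol : ∀ (j : Nat) (hj : j < q.length),
      ((q :: rest).map (fun p => pvAt p j)).foldl min (q[j]'hj)
        = (rest.map (fun p => pvAt p j)).foldl min (pvAt q j) := by
    intro j hj
    rw [List.map_cons, List.foldl_cons, pvAt_eq q j hj, min_self]
  have hAcolMax : ∀ (j : Nat) (hj : j < q.length),
      ((q :: rest).map (fun p => pvAt p j)).foldl max (q[j]'hj)
        = (rest.map (fun p => pvAt p j)).foldl max (pvAt q j) := by
    intro j hj
    rw [List.map_cons, List.foldl_cons, pvAt_eq q j hj, max_self]
  refine Prod.ext ?_ ?_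
  · apply List.ext_getElem
    · simp [foldMin_length, passMin_length]
    · intro j hjA hjB
      have hj : j < q.length := by rwa [foldMin_length] at hjA
      rw [foldMin_getElem (q :: rest) hlen q j hj]
      rcases Nat.lt_or_ge j 3 with h3 | h3
      · rw [if_pos h3, hAcol j hj]
        interval_cases j <;> simp
      · have h0 : ¬ (0 : Nat) = j := by omega
        have h1 : ¬ (1 : Nat) = j := by omega
        have h2 : ¬ (2 : Nat) = j := by omega
        have h3' : ¬ j < 3 := by omega
        simp [h0, h1, h2, h3']
  · apply List.ext_getElem
    · simp [foldMax_length, passMax_length]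
    · intro j hjA hjB
      have hj : j < q.length := by rwa [foldMax_length] at hjA
      rw [foldMax_getElem (q :: rest) hlen q j hj]
      rcases Nat.lt_or_ge j 3 with h3 | h3
      · rw [if_pos h3, hAcolMax j hj]
        interval_cases j <;> simp
      · have h0 : ¬ (0 : Nat) = j := by omega
        have h1 : ¬ (1 : Nat) = j := by omega
        have h2 : ¬ (2 : Nat) = j := by omega
        have h3' : ¬ j < 3 := by omega
        simp [h0, h1, h2, h3']
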